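-- pv_equiv track=rewrite | github.com/csm120/keyquest | tools/dev/release_bump.py | suggest_bump
-- ===== SOURCE A (Python) =====
-- def suggest_bump(files: list[str]) -> str:
--     if not files:
--         return "patch"
--
--     minor_prefixes = (
--         "modules/",
--         "games/",
--         "keyquest.pyw",
--         ".github/workflows/release.yml",
--         "tools/build/",
--     )
--     patch_prefixes = (
--         "docs/",
--         "site/",
--         "README",
--         "Sentences/",
--         "tools/dev/write_keyquest_blog_post.py",
--         "tools/dev/build_pages_site.py",
--     )
--
--     for path in files:
--         normalized = path.replace("\\", "/")
--         if normalized == "modules/version.py":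
--             continue
--         if normalized.startswith(minor_prefixes):
--             return "minor"
--
--     for path in files:
--         normalized = path.replace("\\", "/")
--         if normalized.startswith(patch_prefixes):
--             continue
--         return "minor"
--
--     return "patch"
-- ===== SOURCE B (Python) =====
-- def suggest_bump(files: list[str]) -> str:
--     if not files:
--         return "patch"
--
--     minor_prefixes = (
--         "modules/",
--         "games/",
--         "keyquest.pyw",
--         ".github/workflows/release.yml",
--         "tools/build/",
--     )
--     patch_prefixes = (
--         "docs/",
--         "site/",
--         "README",
--         "Sentences/",
--         "tools/dev/write_keyquest_blog_post.py",
--         "tools/dev/build_pages_site.py",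
--     )
--
--     for path in files:
--         n = path.replace("\\", "/")
--         if (n != "modules/version.py" and n.startswith(minor_prefixes)) or not n.startswith(patch_prefixes):
--             return "minor"
--     return "patch"
-- ===== Notes on version B (the rewrite author's own statement) =====
-- stated objective: simpler
-- what changed: Fuses A's two sequential full scans of the file list into one pass that returns 'minor' at the first path satisfying the disjunction of the two triggering conditions (using ∃P ∨ ∃Q = ∃(P∨Q)), keeping the version.py exclusion only on the minor-prefix term; one scan and one normalization per path instead of up to two.
import Mathlib
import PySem

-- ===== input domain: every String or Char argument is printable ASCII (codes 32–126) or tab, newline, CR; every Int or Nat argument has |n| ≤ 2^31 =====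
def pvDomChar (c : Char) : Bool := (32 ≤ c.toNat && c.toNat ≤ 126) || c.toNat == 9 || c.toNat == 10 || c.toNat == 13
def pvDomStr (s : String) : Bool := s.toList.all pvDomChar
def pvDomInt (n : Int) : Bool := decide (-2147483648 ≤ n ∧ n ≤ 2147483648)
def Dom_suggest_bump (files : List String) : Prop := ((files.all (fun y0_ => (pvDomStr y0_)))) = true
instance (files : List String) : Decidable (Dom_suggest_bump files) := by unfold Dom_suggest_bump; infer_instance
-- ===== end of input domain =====

-- B fuses A's two sequential scans over the file list into a single pass; same return value, simpler shape.

-- shared helpers (the literal prefix tuples and path normalization of both Pythons)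
def pvMinorPrefixes : List String :=
  ["modules/", "games/", "keyquest.pyw", ".github/workflows/release.yml", "tools/build/"]
def pvPatchPrefixes : List String :=
  ["docs/", "site/", "README", "Sentences/", "tools/dev/write_keyquest_blog_post.py", "tools/dev/build_pages_site.py"]
-- path.replace("\\", "/")
def pvNorm (p : String) : String := PySem.Str.replace p "\\" "/"
-- n.startswith(tuple) : true if n starts with any of the prefixes
def pvStartsAny (n : String) (ps : List String) : Bool := ps.any (fun q => PySem.Str.startswith n q)

-- ===== PORT A =====
-- first loop: skip modules/version.py, return "minor" on a minor-prefix match, else fall through to the second loop on the full list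
def pvLoop1 (files all : List String) : String :=
  match files with
  | [] => pvLoop2 all
  | p :: rest =>
    let n := pvNorm p
    if n = "modules/version.py" then pvLoop1 rest all
    else if pvStartsAny n pvMinorPrefixes then "minor"
    else pvLoop1 rest all
-- second loop: continue on patch-prefix paths, otherwise return "minor"; "patch" after the loop
where pvLoop2 : List String → String
  | [] => "patch"
  | p :: rest =>
    let n := pvNorm p
    if pvStartsAny n pvPatchPrefixes then pvLoop2 rest else "minor"

def suggest_bump (files : List String) : String :=
  if files = [] then "patch" else pvLoop1 files files

-- ===== PORT B =====
-- single pass: "minor" at the first path triggering either condition, "patch" after the loop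
def pvLoopB : List String → String
  | [] => "patch"
  | p :: rest =>
    let n := pvNorm p
    if (n ≠ "modules/version.py" && pvStartsAny n pvMinorPrefixes) || !pvStartsAny n pvPatchPrefixes
    then "minor" else pvLoopB rest

def suggest_bump_alt (files : List String) : String :=
  if files = [] then "patch" else pvLoopB files

-- ===== PRECONDITION & SPEC =====
def Spec_suggest_bump (files : List String) (out : String) : Prop := out = suggest_bump_alt files
instance (files : List String) (out : String) : Decidable (Spec_suggest_bump files out) := by unfold Spec_suggest_bump; infer_instance

-- ===== CLAIM (what is proved, stated in full; the proofs are below) =====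
def Claim_equal_suggest_bump : Prop := ∀ (files : List String), Dom_suggest_bump files → Spec_suggest_bump files (suggest_bump files)

-- ===== LEMMAS AND PROOFS =====

def pvCondM (p : String) : Bool :=
  (pvNorm p ≠ "modules/version.py") && pvStartsAny (pvNorm p) pvMinorPrefixes
def pvCondP (p : String) : Bool := !pvStartsAny (pvNorm p) pvPatchPrefixes

theorem pvLoopB_eq (fs : List String) :
    pvLoopB fs = if fs.any (fun p => pvCondM p || pvCondP p) then "minor" else "patch" := by
  induction fs with
  | nil => simp [pvLoopB]
  | cons p rest ih =>
    have hstep : pvLoopB (p :: rest)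
        = if pvCondM p || pvCondP p then "minor" else pvLoopB rest := rfl
    rw [hstep, List.any_cons]
    cases hc : pvCondM p || pvCondP p <;> simp [hc, ih]

theorem pvLoop2_eq (fs : List String) :
    pvLoop1.pvLoop2 fs = if fs.any pvCondP then "minor" else "patch" := by
  induction fs with
  | nil => simp [pvLoop1.pvLoop2]
  | cons p rest ih =>
    rw [List.any_cons]
    show (if pvStartsAny (pvNorm p) pvPatchPrefixes then pvLoop1.pvLoop2 rest else "minor") = _
    cases hc : pvStartsAny (pvNorm p) pvPatchPrefixes <;> simp [pvCondP, hc, ih]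

theorem pvLoop1_eq (fs all : List String) :
    pvLoop1 fs all = if fs.any pvCondM then "minor" else pvLoop1.pvLoop2 all := by
  induction fs with
  | nil => simp [pvLoop1]
  | cons p rest ih =>
    rw [List.any_cons]
    show (if pvNorm p = "modules/version.py" then pvLoop1 rest all
          else if pvStartsAny (pvNorm p) pvMinorPrefixes then "minor" else pvLoop1 rest all) = _
    by_cases hv : pvNorm p = "modules/version.py"
    · simp [pvCondM, hv, ih]
    · cases hm : pvStartsAny (pvNorm p) pvMinorPrefixes <;> simp [pvCondM, hv, hm, ih]

theorem pvAB_eq (fs : List String) : pvLoop1 fs fs = pvLoopB fs := by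
  rw [pvLoop1_eq, pvLoop2_eq, pvLoopB_eq]
  have h : fs.any (fun p => pvCondM p || pvCondP p) = (fs.any pvCondM || fs.any pvCondP) := by
    apply Bool.eq_iff_iff.mpr
    simp only [List.any_eq_true, Bool.or_eq_true]
    constructor
    · rintro ⟨x, hx, h | h⟩
      · exact Or.inl ⟨x, hx, h⟩
      · exact Or.inr ⟨x, hx, h⟩
    · rintro (⟨x, hx, h⟩ | ⟨x, hx, h⟩)
      · exact ⟨x, hx, Or.inl h⟩
      · exact ⟨x, hx, Or.inr h⟩
  rw [h]
  cases h1 : fs.any pvCondM <;> cases h2 : fs.any pvCondP <;> simp [h1, h2]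

-- ===== VERDICT (by name: the statement is the Claim_ definition above) =====
theorem suggest_bump_spec : Claim_equal_suggest_bump := by
  intro files _
  unfold Spec_suggest_bump suggest_bump suggest_bump_alt
  by_cases h : files = []
  · simp [h]
  · simp [h, pvAB_eq]
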